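-- pv_equiv track=rewrite | github.com/rodosaborio/second-opinion | src/second_opinion/mcp/tools/second_opinion.py | _get_model_name_suggestions
-- ===== SOURCE A (Python) =====
-- def _get_model_name_suggestions(invalid_model: str) -> str:
--     """
--     Generate helpful model name suggestions based on common patterns.
--
--     Args:
--         invalid_model: The invalid model name that was provided
--
--     Returns:
--         Formatted string with model name suggestions
--     """
--     suggestions = []
--
--     # Common provider suggestions
--     suggestions.append("**Cloud Models (OpenRouter format):**")
--     suggestions.append("- Claude: `anthropic/claude-3-5-sonnet`, `anthropic/claude-3-haiku`")
--     suggestions.append("- ChatGPT: `openai/gpt-4o`, `openai/gpt-4o-mini`")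
--     suggestions.append("- Gemini: `google/gemini-pro-1.5`, `google/gemini-flash-1.5`")
--     suggestions.append("")
--     suggestions.append("**Local Models (LM Studio):**")
--     suggestions.append("- Qwen: `qwen3-4b-mlx`, `qwen3-0.6b-mlx`")
--     suggestions.append("- Codestral: `codestral-22b-v0.1`, `devstral-small-2505-mlx`")
--
--     # Analyze the invalid model for specific suggestions
--     invalid_lower = invalid_model.lower() if invalid_model else ""
--
--     if "claude" in invalid_lower:
--         suggestions.append("")
--         suggestions.append("**For Claude models, try:**")
--         suggestions.append("- `anthropic/claude-3-5-sonnet` (recommended)")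
--         suggestions.append("- `anthropic/claude-3-haiku` (budget option)")
--     elif "gpt" in invalid_lower or "openai" in invalid_lower:
--         suggestions.append("")
--         suggestions.append("**For OpenAI models, try:**")
--         suggestions.append("- `openai/gpt-4o` (latest)")
--         suggestions.append("- `openai/gpt-4o-mini` (budget option)")
--     elif "gemini" in invalid_lower or "google" in invalid_lower:
--         suggestions.append("")
--         suggestions.append("**For Google models, try:**")
--         suggestions.append("- `google/gemini-pro-1.5`")
--         suggestions.append("- `google/gemini-flash-1.5`")
--     elif any(local in invalid_lower for local in ["qwen", "codestral", "llama", "mlx"]):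
--         suggestions.append("")
--         suggestions.append("**For local models, try:**")
--         suggestions.append("- `qwen3-4b-mlx` (good balance)")
--         suggestions.append("- `codestral-22b-v0.1` (code-focused)")
--
--     return "\n".join(suggestions)
-- ===== SOURCE B (Python) =====
-- _COMMON = (
--     "**Cloud Models (OpenRouter format):**\n"
--     "- Claude: `anthropic/claude-3-5-sonnet`, `anthropic/claude-3-haiku`\n"
--     "- ChatGPT: `openai/gpt-4o`, `openai/gpt-4o-mini`\n"
--     "- Gemini: `google/gemini-pro-1.5`, `google/gemini-flash-1.5`\n"
--     "\n"
--     "**Local Models (LM Studio):**\n"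
--     "- Qwen: `qwen3-4b-mlx`, `qwen3-0.6b-mlx`\n"
--     "- Codestral: `codestral-22b-v0.1`, `devstral-small-2505-mlx`"
-- )
--
-- # keyword -> priority category (smaller number = higher priority)
-- _KEYWORD_CAT = {
--     "claude": 0,
--     "gpt": 1, "openai": 1,
--     "gemini": 2, "google": 2,
--     "qwen": 3, "codestral": 3, "llama": 3, "mlx": 3,
-- }
--
-- _BLOCKS = [
--     "\n\n**For Claude models, try:**\n"
--     "- `anthropic/claude-3-5-sonnet` (recommended)\n"
--     "- `anthropic/claude-3-haiku` (budget option)",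
--     "\n\n**For OpenAI models, try:**\n"
--     "- `openai/gpt-4o` (latest)\n"
--     "- `openai/gpt-4o-mini` (budget option)",
--     "\n\n**For Google models, try:**\n"
--     "- `google/gemini-pro-1.5`\n"
--     "- `google/gemini-flash-1.5`",
--     "\n\n**For local models, try:**\n"
--     "- `qwen3-4b-mlx` (good balance)\n"
--     "- `codestral-22b-v0.1` (code-focused)",
-- ]
--
--
-- def _get_model_name_suggestions(invalid_model: str) -> str:
--     low = invalid_model.lower() if invalid_model else ""
--     cat = min((c for k, c in _KEYWORD_CAT.items() if k in low), default=None)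
--     return _COMMON if cat is None else _COMMON + _BLOCKS[cat]
-- ===== Notes on version B (the rewrite author's own statement) =====
-- stated objective: simpler
-- what changed: Eliminates list building, join and the elif dispatch entirely: the header and each extra block are pre-joined string constants, every keyword maps to a numeric priority category in one flat dict, the winner is min() over the categories of all matching keywords, and the result is a single string concatenation.
import Mathlib
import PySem

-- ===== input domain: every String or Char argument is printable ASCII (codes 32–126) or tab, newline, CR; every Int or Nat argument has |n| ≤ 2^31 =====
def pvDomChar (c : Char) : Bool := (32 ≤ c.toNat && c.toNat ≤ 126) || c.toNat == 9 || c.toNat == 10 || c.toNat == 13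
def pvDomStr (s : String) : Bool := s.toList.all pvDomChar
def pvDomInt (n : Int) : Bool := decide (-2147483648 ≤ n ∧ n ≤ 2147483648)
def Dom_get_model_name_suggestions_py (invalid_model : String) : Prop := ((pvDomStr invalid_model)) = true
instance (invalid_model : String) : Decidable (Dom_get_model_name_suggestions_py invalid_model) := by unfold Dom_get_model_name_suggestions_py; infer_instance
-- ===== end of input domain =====

-- B drops the list building, the join and the elif dispatch: pre-joined string constants,
-- a flat keyword->priority-category map whose minimum over all matching keywords picks the
-- block, and one string concatenation (objective: simpler). Same return value everywhere.

-- ===== PORT A =====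
-- literal transliteration: appends to `suggestions`, then the if/elif chain, then "\n".join
def get_model_name_suggestions_py (invalid_model : String) : String :=
  let suggestions : List String := []
  let suggestions := suggestions ++ ["**Cloud Models (OpenRouter format):**"]
  let suggestions := suggestions ++ ["- Claude: `anthropic/claude-3-5-sonnet`, `anthropic/claude-3-haiku`"]
  let suggestions := suggestions ++ ["- ChatGPT: `openai/gpt-4o`, `openai/gpt-4o-mini`"]
  let suggestions := suggestions ++ ["- Gemini: `google/gemini-pro-1.5`, `google/gemini-flash-1.5`"]
  let suggestions := suggestions ++ [""]
  let suggestions := suggestions ++ ["**Local Models (LM Studio):**"]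
  let suggestions := suggestions ++ ["- Qwen: `qwen3-4b-mlx`, `qwen3-0.6b-mlx`"]
  let suggestions := suggestions ++ ["- Codestral: `codestral-22b-v0.1`, `devstral-small-2505-mlx`"]
  let invalid_lower := if invalid_model ≠ "" then PySem.Str.lower invalid_model else ""
  let suggestions :=
    if PySem.Str.isIn "claude" invalid_lower then
      suggestions ++ ["", "**For Claude models, try:**",
        "- `anthropic/claude-3-5-sonnet` (recommended)",
        "- `anthropic/claude-3-haiku` (budget option)"]
    else if PySem.Str.isIn "gpt" invalid_lower || PySem.Str.isIn "openai" invalid_lower then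
      suggestions ++ ["", "**For OpenAI models, try:**",
        "- `openai/gpt-4o` (latest)",
        "- `openai/gpt-4o-mini` (budget option)"]
    else if PySem.Str.isIn "gemini" invalid_lower || PySem.Str.isIn "google" invalid_lower then
      suggestions ++ ["", "**For Google models, try:**",
        "- `google/gemini-pro-1.5`",
        "- `google/gemini-flash-1.5`"]
    else if ["qwen", "codestral", "llama", "mlx"].any (fun loc => PySem.Str.isIn loc invalid_lower) then
      suggestions ++ ["", "**For local models, try:**",
        "- `qwen3-4b-mlx` (good balance)",
        "- `codestral-22b-v0.1` (code-focused)"]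
    else suggestions
  PySem.Str.join "\n" suggestions

-- ===== PORT B =====
def pvCommon : String := "**Cloud Models (OpenRouter format):**\n- Claude: `anthropic/claude-3-5-sonnet`, `anthropic/claude-3-haiku`\n- ChatGPT: `openai/gpt-4o`, `openai/gpt-4o-mini`\n- Gemini: `google/gemini-pro-1.5`, `google/gemini-flash-1.5`\n\n**Local Models (LM Studio):**\n- Qwen: `qwen3-4b-mlx`, `qwen3-0.6b-mlx`\n- Codestral: `codestral-22b-v0.1`, `devstral-small-2505-mlx`"

-- keyword -> priority category (smaller number = higher priority)
def pvKeywordCats : List (String × Nat) :=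
  [("claude", 0),
   ("gpt", 1), ("openai", 1),
   ("gemini", 2), ("google", 2),
   ("qwen", 3), ("codestral", 3), ("llama", 3), ("mlx", 3)]

def pvBlocks : List String :=
  ["\n\n**For Claude models, try:**\n- `anthropic/claude-3-5-sonnet` (recommended)\n- `anthropic/claude-3-haiku` (budget option)",
   "\n\n**For OpenAI models, try:**\n- `openai/gpt-4o` (latest)\n- `openai/gpt-4o-mini` (budget option)",
   "\n\n**For Google models, try:**\n- `google/gemini-pro-1.5`\n- `google/gemini-flash-1.5`",
   "\n\n**For local models, try:**\n- `qwen3-4b-mlx` (good balance)\n- `codestral-22b-v0.1` (code-focused)"]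

def get_model_name_suggestions_py_alt (invalid_model : String) : String :=
  let low := if invalid_model ≠ "" then PySem.Str.lower invalid_model else ""
  -- min(... generator of categories of matching keywords ..., default=None)
  let cat := (pvKeywordCats.filterMap
    (fun kc => if PySem.Str.isIn kc.1 low then some kc.2 else none)).min?
  match cat with
  | none => pvCommon
  | some c => pvCommon ++ pvBlocks.getD c ""

-- ===== PRECONDITION & SPEC =====
def Spec_get_model_name_suggestions_py (invalid_model : String) (out : String) : Prop := out = get_model_name_suggestions_py_alt invalid_model
instance (invalid_model : String) (out : String) : Decidable (Spec_get_model_name_suggestions_py invalid_model out) := by unfold Spec_get_model_name_suggestions_py; infer_instance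

-- ===== CLAIM (what is proved, stated in full; the proofs are below) =====
def Claim_equal_get_model_name_suggestions_py : Prop := ∀ (invalid_model : String), Dom_get_model_name_suggestions_py invalid_model → Spec_get_model_name_suggestions_py invalid_model (get_model_name_suggestions_py invalid_model)

-- ===== LEMMAS AND PROOFS =====

-- characterises B's min-over-matching-categories as the first-match priority chain
theorem pvMinCat_char (f : String → Bool) :
    ((pvKeywordCats.filterMap (fun kc => if f kc.1 then some kc.2 else none)).min?) =
      (if f "claude" then some 0
       else if f "gpt" || f "openai" then some 1
       else if f "gemini" || f "google" then some 2
       else if f "qwen" || (f "codestral" || (f "llama" || f "mlx")) then some 3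
       else none) := by
  simp only [pvKeywordCats, List.filterMap_cons, List.filterMap_nil]
  generalize f "claude" = b1
  generalize f "gpt" = b2
  generalize f "openai" = b3
  generalize f "gemini" = b4
  generalize f "google" = b5
  generalize f "qwen" = b6
  generalize f "codestral" = b7
  generalize f "llama" = b8
  generalize f "mlx" = b9
  cases b1 <;> cases b2 <;> cases b3 <;> cases b4 <;> cases b5 <;> cases b6 <;> cases b7 <;> cases b8 <;> cases b9 <;> rfl

set_option maxRecDepth 1000000 in
theorem pvCat0 : pvCommon ++ pvBlocks.getD 0 "" = "**Cloud Models (OpenRouter format):**\n- Claude: `anthropic/claude-3-5-sonnet`, `anthropic/claude-3-haiku`\n- ChatGPT: `openai/gpt-4o`, `openai/gpt-4o-mini`\n- Gemini: `google/gemini-pro-1.5`, `google/gemini-flash-1.5`\n\n**Local Models (LM Studio):**\n- Qwen: `qwen3-4b-mlx`, `qwen3-0.6b-mlx`\n- Codestral: `codestral-22b-v0.1`, `devstral-small-2505-mlx`\n\n**For Claude models, try:**\n- `anthropic/claude-3-5-sonnet` (recommended)\n- `anthropic/claude-3-haiku` (budget option)" := by rfl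
set_option maxRecDepth 1000000 in
theorem pvCat1 : pvCommon ++ pvBlocks.getD 1 "" = "**Cloud Models (OpenRouter format):**\n- Claude: `anthropic/claude-3-5-sonnet`, `anthropic/claude-3-haiku`\n- ChatGPT: `openai/gpt-4o`, `openai/gpt-4o-mini`\n- Gemini: `google/gemini-pro-1.5`, `google/gemini-flash-1.5`\n\n**Local Models (LM Studio):**\n- Qwen: `qwen3-4b-mlx`, `qwen3-0.6b-mlx`\n- Codestral: `codestral-22b-v0.1`, `devstral-small-2505-mlx`\n\n**For OpenAI models, try:**\n- `openai/gpt-4o` (latest)\n- `openai/gpt-4o-mini` (budget option)" := by rfl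
set_option maxRecDepth 1000000 in
theorem pvCat2 : pvCommon ++ pvBlocks.getD 2 "" = "**Cloud Models (OpenRouter format):**\n- Claude: `anthropic/claude-3-5-sonnet`, `anthropic/claude-3-haiku`\n- ChatGPT: `openai/gpt-4o`, `openai/gpt-4o-mini`\n- Gemini: `google/gemini-pro-1.5`, `google/gemini-flash-1.5`\n\n**Local Models (LM Studio):**\n- Qwen: `qwen3-4b-mlx`, `qwen3-0.6b-mlx`\n- Codestral: `codestral-22b-v0.1`, `devstral-small-2505-mlx`\n\n**For Google models, try:**\n- `google/gemini-pro-1.5`\n- `google/gemini-flash-1.5`" := by rfl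
set_option maxRecDepth 1000000 in
theorem pvCat3 : pvCommon ++ pvBlocks.getD 3 "" = "**Cloud Models (OpenRouter format):**\n- Claude: `anthropic/claude-3-5-sonnet`, `anthropic/claude-3-haiku`\n- ChatGPT: `openai/gpt-4o`, `openai/gpt-4o-mini`\n- Gemini: `google/gemini-pro-1.5`, `google/gemini-flash-1.5`\n\n**Local Models (LM Studio):**\n- Qwen: `qwen3-4b-mlx`, `qwen3-0.6b-mlx`\n- Codestral: `codestral-22b-v0.1`, `devstral-small-2505-mlx`\n\n**For local models, try:**\n- `qwen3-4b-mlx` (good balance)\n- `codestral-22b-v0.1` (code-focused)" := by rfl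

-- ===== VERDICT (by name: the statement is the Claim_ definition above) =====
set_option maxRecDepth 1000000 in
set_option maxHeartbeats 1000000 in
theorem get_model_name_suggestions_py_spec : Claim_equal_get_model_name_suggestions_py := by
  intro invalid_model _
  unfold Spec_get_model_name_suggestions_py get_model_name_suggestions_py get_model_name_suggestions_py_alt
  dsimp only []
  generalize (if invalid_model ≠ "" then PySem.Str.lower invalid_model else "") = low
  rw [pvMinCat_char (fun k => PySem.Str.isIn k low)]
  simp only [List.any_cons, List.any_nil, Bool.or_false]
  split_ifs
  · simp only [List.nil_append, List.cons_append]; rw [pvCat0]; rfl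
  · simp only [List.nil_append, List.cons_append]; rw [pvCat1]; rfl
  · simp only [List.nil_append, List.cons_append]; rw [pvCat2]; rfl
  · simp only [List.nil_append, List.cons_append]; rw [pvCat3]; rfl
  · simp only [List.nil_append, List.cons_append]; rfl
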